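-- pv_equiv track=rewrite | github.com/olivejua/practice-algorithm-python | 프로그래머스/메뉴 리뉴얼.py | solution
-- ===== SOURCE A (Python) =====
-- import collections
-- from typing import List
--
-- def solution(orders: List, course: List):
--     answer = []
--
--
--     for course_size in course:
--         dict = collections.defaultdict(int)
--         for order in orders:
--             # combinations = list(itertools.combinations(sorted(order), c))
--             combinations = getCombination(course_size, sorted(order))
--             for combi in combinations:
--                 dict[''.join(combi)] += 1
--
--         answer += list(filter(lambda x: dict[x]==max(dict.values()) and dict[x] > 1, dict))
--
--     return sorted(answer)
--
-- def getCombination(course_size, order):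
--     result = []
--
--     def dfs(elements: List, start, k):
--         if k==0:
--             result.append(elements[:])
--
--         for i in range(start, len(order)):
--             elements.append(order[i])
--             dfs(elements, i+1, k-1)
--             elements.pop()
--
--     dfs([], 0, course_size)
--     return result
-- ===== SOURCE B (Python) =====
-- import collections
-- from typing import List
--
--
-- def solution(orders: List, course: List):
--     all_rows = [build_rows(sorted(order)) for order in orders]
--     answer = []
--     for c in course:
--         cnt = collections.Counter()
--         for rows in all_rows:
--             if 0 <= c < len(rows):
--                 cnt.update(''.join(t) for t in rows[c])
--         best = max(cnt.values()) if cnt else 0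
--         answer += [s for s, v in cnt.items() if v == best and v > 1]
--     return sorted(answer)
--
--
-- def build_rows(chars):
--     # rows[k] = all length-k combinations of the processed prefix, built by DP
--     rows = [[[]]] + [[] for _ in chars]
--     for ch in chars:
--         rows = [rows[0]] + [rows[k] + [t + [ch] for t in rows[k - 1]] for k in range(1, len(rows))]
--     return rows
-- ===== Notes on version B (the rewrite author's own statement) =====
-- stated objective: faster
-- what changed: The recursive DFS combination generator (re-run for every course size x order) is replaced by a per-order dynamic programme built once that yields the k-combination lists for all k in one left-to-right pass and is reused across course sizes, and the maximum count is computed once per course size instead of re-evaluating max(dict.values()) inside the filter lambda for every key.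
import Mathlib
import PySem

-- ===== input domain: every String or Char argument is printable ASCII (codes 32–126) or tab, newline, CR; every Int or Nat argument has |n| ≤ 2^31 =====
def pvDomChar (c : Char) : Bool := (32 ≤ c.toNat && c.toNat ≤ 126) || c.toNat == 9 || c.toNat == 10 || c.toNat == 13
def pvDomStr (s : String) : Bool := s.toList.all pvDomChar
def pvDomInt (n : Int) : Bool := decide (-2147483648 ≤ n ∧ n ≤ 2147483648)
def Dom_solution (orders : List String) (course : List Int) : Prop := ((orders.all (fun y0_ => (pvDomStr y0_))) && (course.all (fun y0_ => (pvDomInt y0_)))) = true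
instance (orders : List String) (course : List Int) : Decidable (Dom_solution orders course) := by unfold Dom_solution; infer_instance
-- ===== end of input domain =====

-- B replaces A's per-course-size recursive DFS combination generator by a per-order DP table of
-- all k-combinations built once and reused for every course size, and takes the max count once per
-- course size instead of inside the filter lambda (objective: faster, measured).
-- ''.join over a list of 1-character strings is ported as String.mk (exact).

-- ===== PORT A =====
-- dfs(elements, start, k): 'for i in range(start, len(order))' is ported as structural
-- recursion on the suffix 'rest = order[start:]' (order[i] is the head of the suffix) — exact.
mutual
def dfsA (elements : List Char) (rest : List Char) (k : Int) : List (List Char) :=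
  (if k = 0 then [elements] else []) ++ dfsALoop elements rest k
termination_by (rest.length, 1)

def dfsALoop (elements : List Char) (rest : List Char) (k : Int) : List (List Char) :=
  match rest with
  | [] => []
  | c :: rs => dfsA (elements ++ [c]) rs (k - 1) ++ dfsALoop elements rs k
termination_by (rest.length, 0)
end

def getCombination (course_size : Int) (order : List Char) : List (List Char) :=
  dfsA [] order course_size

def solution (orders : List String) (course : List Int) : List String :=
  let answer := course.foldl (fun answer course_size =>
    let d := orders.foldl (fun d order =>
      let combinations := getCombination course_size (PySem.List.sorted order.toList (fun c => c))
      combinations.foldl (fun d combi => d.modify (String.mk combi) 0 (· + 1)) d)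
      (PySem.Dict.empty : PySem.Dict String Int)
    answer ++ d.keys.filter (fun x =>
      decide (some (d.getD x 0) = (PySem.List.max? d.values (fun v => v)).map (fun m => m)) &&
      decide (d.getD x 0 > 1))) []
  PySem.List.sorted answer (fun s => s)

-- ===== PORT B =====
-- build_rows(chars): rows[k] = all k-element combinations (as char lists) of the processed prefix
def buildRows (chars : List Char) : List (List (List Char)) :=
  chars.foldl (fun rows ch =>
    match rows with
    | [] => []
    | r0 :: rest =>
        r0 :: List.zipWith (fun prev cur => cur ++ prev.map (fun t => t ++ [ch])) (r0 :: rest) rest)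
    ([[[]]] ++ chars.map (fun _ => []))

def solution_alt (orders : List String) (course : List Int) : List String :=
  let all_rows := orders.map (fun order => buildRows (PySem.List.sorted order.toList (fun c => c)))
  let answer := course.foldl (fun answer c =>
    let cnt := all_rows.foldl (fun cnt rows =>
      if 0 ≤ c ∧ c < (rows.length : Int) then
        ((PySem.List.pyGet? rows c).getD []).foldl (fun d t => d.modify (String.mk t) 0 (· + 1)) cnt
      else cnt) (PySem.Dict.empty : PySem.Dict String Int)
    let best : Int := if cnt.items.isEmpty then 0 else (PySem.List.max? cnt.values (fun v => v)).getD 0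
    answer ++ (cnt.items.filter (fun p => decide (p.2 = best) && decide (p.2 > 1))).map (fun p => p.1)) []
  PySem.List.sorted answer (fun s => s)

-- ===== PRECONDITION & SPEC =====
def Spec_solution (orders : List String) (course : List Int) (out : List String) : Prop := out = solution_alt orders course
instance (orders : List String) (course : List Int) (out : List String) : Decidable (Spec_solution orders course out) := by unfold Spec_solution; infer_instance

-- ===== CLAIM (what is proved, stated in full; the proofs are below) =====
def Claim_equal_solution : Prop := ∀ (orders : List String) (course : List Int), Dom_solution orders course → Spec_solution orders course (solution orders course)

-- ===== LEMMAS AND PROOFS =====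

-- A side: the DFS generator is itertools-order combinations
theorem dfsA_neg : ∀ (rest : List Char) (elements : List Char) (k : Int), k < 0 →
    dfsA elements rest k = [] ∧ dfsALoop elements rest k = [] := by
  intro rest
  induction rest with
  | nil =>
      intro elements k hk
      constructor
      · rw [dfsA]; simp [dfsALoop]; omega
      · rw [dfsALoop]
  | cons c rs ih =>
      intro elements k hk
      have h1 := (ih (elements ++ [c]) (k - 1) (by omega)).1
      have h2 := (ih elements k hk).2
      have hloop : dfsALoop elements (c :: rs) k = [] := by
        rw [dfsALoop]; simp [h1, h2]
      refine ⟨?_, hloop⟩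
      rw [dfsA]; simp [hloop]; omega

theorem dfsALoop_zero : ∀ (rest : List Char) (elements : List Char),
    dfsALoop elements rest 0 = [] := by
  intro rest
  induction rest with
  | nil => intro elements; rw [dfsALoop]
  | cons c rs ih =>
      intro elements
      rw [dfsALoop]
      simp [ih]
      exact (dfsA_neg rs (elements ++ [c]) (-1) (by omega)).1

theorem dfsA_eq_combinations : ∀ (rest : List Char) (r : Nat) (elements : List Char),
    dfsA elements rest (r : Int) = (PySem.List.combinations rest r).map (elements ++ ·) := by
  intro rest
  induction rest with
  | nil =>
      intro r elements
      match r with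
      | 0 => rw [dfsA]; simp [dfsALoop, PySem.List.combinations_zero]
      | r + 1 =>
          rw [dfsA]
          simp [dfsALoop, PySem.List.combinations_nil_succ]
          omega
  | cons c rs ih =>
      intro r elements
      match r with
      | 0 => rw [dfsA]; simp [dfsALoop_zero, PySem.List.combinations_zero]
      | r + 1 =>
          rw [dfsA, dfsALoop]
          have hne : ((r + 1 : Nat) : Int) ≠ 0 := by push_cast; omega
          have hsub : ((r + 1 : Nat) : Int) - 1 = (r : Int) := by push_cast; omega
          have hloop : dfsALoop elements rs ((r + 1 : Nat) : Int) = dfsA elements rs ((r + 1 : Nat) : Int) := by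
            rw [dfsA]
            have : ¬ ((r : Int) + 1 = 0) := by omega
            simp [this]
          rw [hsub, hloop, ih r (elements ++ [c]), ih (r + 1) elements,
            PySem.List.combinations_cons_succ]
          have : ¬ ((r : Int) + 1 = 0) := by omega
          simp [this, Function.comp_def]

theorem getCombination_eq (chars : List Char) (c : Int) (hc : 0 ≤ c) :
    getCombination c chars = PySem.List.combinations chars c.toNat := by
  unfold getCombination
  obtain ⟨r, rfl⟩ : ∃ r : Nat, (r : Int) = c := ⟨c.toNat, Int.toNat_of_nonneg hc⟩
  rw [dfsA_eq_combinations]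
  simp

-- B side: the DP rows are (a permutation of) the combinations
theorem combinations_append_singleton : ∀ (p : List Char) (ch : Char) (k : Nat),
    (PySem.List.combinations (p ++ [ch]) (k + 1)).Perm
      (PySem.List.combinations p (k + 1) ++ (PySem.List.combinations p k).map (· ++ [ch])) := by
  intro p
  induction p with
  | nil =>
      intro ch k
      match k with
      | 0 => simp [PySem.List.combinations_cons_succ, PySem.List.combinations_zero,
               PySem.List.combinations_nil_succ]
      | k + 1 => simp [PySem.List.combinations_cons_succ, PySem.List.combinations_nil_succ]
  | cons a p' ih =>
      intro ch k
      rw [List.cons_append, PySem.List.combinations_cons_succ,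
        PySem.List.combinations_cons_succ a p' k]
      match k with
      | 0 =>
          simp only [PySem.List.combinations_zero, List.map_cons, List.map_nil,
            List.singleton_append, List.nil_append]
          refine List.Perm.cons _ ?_
          have h1 : (PySem.List.combinations (p' ++ [ch]) 1).Perm
              (PySem.List.combinations p' 1 ++ [[ch]]) := by
            simpa [PySem.List.combinations_zero] using ih ch 0
          simpa using h1
      | k + 1 =>
          refine List.Perm.trans (List.Perm.append ((ih ch k).map (a :: ·)) (ih ch (k+1))) ?_
          simp only [PySem.List.combinations_cons_succ, List.map_append, List.map_map,
            List.append_assoc]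
          refine List.Perm.append_left _ ?_
          have h2 := List.perm_append_comm_assoc
            ((PySem.List.combinations p' k).map (fun t => a :: (t ++ [ch])))
            (PySem.List.combinations p' (k+1+1))
            ((PySem.List.combinations p' (k+1)).map (fun t => t ++ [ch]))
          simpa [Function.comp_def] using h2

-- the fold step of buildRows, named for the invariant proof
def stepB (ch : Char) (rows : List (List (List Char))) : List (List (List Char)) :=
  match rows with
  | [] => []
  | r0 :: rest =>
      r0 :: List.zipWith (fun prev cur => cur ++ prev.map (fun t => t ++ [ch])) (r0 :: rest) rest

theorem buildRows_eq (chars : List Char) :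
    buildRows chars = chars.foldl (fun rows ch => stepB ch rows) ([[[]]] ++ chars.map (fun _ => [])) := rfl

theorem foldB_inv : ∀ (cs : List Char) (p : List Char) (rows : List (List (List Char))),
    rows ≠ [] →
    (∀ (k : Nat) (h : k < rows.length), (rows[k]).Perm (PySem.List.combinations p k)) →
    (cs.foldl (fun rows ch => stepB ch rows) rows).length = rows.length ∧
    ∀ (k : Nat) (h : k < (cs.foldl (fun rows ch => stepB ch rows) rows).length),
      ((cs.foldl (fun rows ch => stepB ch rows) rows)[k]).Perm (PySem.List.combinations (p ++ cs) k) := by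
  intro cs
  induction cs with
  | nil =>
      intro p rows _ hk
      refine ⟨by simp, ?_⟩
      simpa using hk
  | cons ch cs' ih =>
      intro p rows hne hk
      obtain ⟨r0, rest, rfl⟩ : ∃ r0 rest, rows = r0 :: rest := by
        cases rows with | nil => exact absurd rfl hne | cons a b => exact ⟨a, b, rfl⟩
      have hstep_len : (stepB ch (r0 :: rest)).length = (r0 :: rest).length := by
        simp [stepB]
      have hstep : ∀ (k : Nat) (h : k < (stepB ch (r0 :: rest)).length),
          ((stepB ch (r0 :: rest))[k]).Perm (PySem.List.combinations (p ++ [ch]) k) := by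
        intro k h
        match k with
        | 0 =>
            have h0 := hk 0 (by simp)
            have : r0 = [[]] := by
              simpa [PySem.List.combinations_zero] using
                (List.Perm.eq_singleton (by simpa [PySem.List.combinations_zero] using h0))
            simp [stepB, this, PySem.List.combinations_zero]
        | k + 1 =>
            have hklt : k < rest.length := by
              have := h; rw [hstep_len] at this; simpa using this
            have e1 : (stepB ch (r0 :: rest))[k+1] =
                rest[k] ++ ((r0 :: rest)[k]'(by simp; omega)).map (fun t => t ++ [ch]) := by
              simp [stepB, List.getElem_zipWith]
            have hk1 := hk (k+1) (by simpa using Nat.succ_lt_succ hklt)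
            have hk0 := hk k (by simp; omega)
            have : ((stepB ch (r0 :: rest))[k+1]).Perm
                (PySem.List.combinations p (k+1) ++ (PySem.List.combinations p k).map (· ++ [ch])) := by
              rw [e1]
              exact List.Perm.append (by simpa using hk1) (List.Perm.map _ hk0)
            exact this.trans (combinations_append_singleton p ch k).symm
      have := ih (p ++ [ch]) (stepB ch (r0 :: rest)) (by simp [stepB]) hstep
      simpa [hstep_len] using this

theorem buildRows_spec (chars : List Char) :
    (buildRows chars).length = chars.length + 1 ∧
    ∀ (k : Nat) (h : k < (buildRows chars).length),
      ((buildRows chars)[k]).Perm (PySem.List.combinations chars k) := by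
  rw [buildRows_eq]
  have hinit : ∀ (k : Nat) (h : k < ([[[]]] ++ chars.map (fun _ => ([] : List (List Char)))).length),
      (([[[]]] ++ chars.map (fun _ => ([] : List (List Char))))[k]).Perm (PySem.List.combinations [] k) := by
    intro k h
    match k with
    | 0 => simp [PySem.List.combinations_zero]
    | k + 1 => simp [PySem.List.combinations_nil_succ]
  have := foldB_inv chars [] ([[[]]] ++ chars.map (fun _ => [])) (by simp) hinit
  simpa using this

-- max over a permuted Int list is the same value
theorem max?_perm_int {l l' : List Int} (h : l.Perm l') :
    PySem.List.max? l (fun v => v) = PySem.List.max? l' (fun v => v) := by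
  cases hl : PySem.List.max? l (fun v => v) with
  | none =>
      rw [PySem.List.max?_eq_none_iff] at hl
      subst hl
      have : l' = [] := List.Perm.eq_nil h.symm
      subst this
      rw [(PySem.List.max?_eq_none_iff [] (fun v : Int => v)).2 rfl]
  | some m =>
      cases hl' : PySem.List.max? l' (fun v => v) with
      | none =>
          rw [PySem.List.max?_eq_none_iff] at hl'
          subst hl'
          have : l = [] := List.Perm.eq_nil h
          subst this
          rw [(PySem.List.max?_eq_none_iff [] (fun v : Int => v)).2 rfl] at hl
          exact hl.symm
      | some m' =>
          have hm : m ∈ l := PySem.List.max?_mem hl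
          have hm' : m' ∈ l' := PySem.List.max?_mem hl'
          have h1 : m ≤ m' := PySem.List.max?_isMax hl' m (h.mem_iff.1 hm)
          have h2 : m' ≤ m := PySem.List.max?_isMax hl m' (h.mem_iff.2 hm')
          rw [le_antisymm h1 h2]

-- the per-order contribution of each side, as lists of joined strings
def flatA (orders : List String) (cs : Int) : List String :=
  orders.flatMap (fun o =>
    (getCombination cs (PySem.List.sorted o.toList (fun c => c))).map String.mk)

def flatB (orders : List String) (c : Int) : List String :=
  orders.flatMap (fun o =>
    (if 0 ≤ c ∧ c < ((buildRows (PySem.List.sorted o.toList (fun ch => ch))).length : Int) then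
      (PySem.List.pyGet? (buildRows (PySem.List.sorted o.toList (fun ch => ch))) c).getD []
    else []).map String.mk)

theorem flatA_perm_flatB (orders : List String) (c : Int) :
    (flatA orders c).Perm (flatB orders c) := by
  unfold flatA flatB
  refine List.Perm.flatMap_left orders ?_
  intro o _
  set chars := PySem.List.sorted o.toList (fun ch => ch) with hchars
  have hlen := (buildRows_spec chars).1
  by_cases hc0 : 0 ≤ c
  · by_cases hclt : c < ((buildRows chars).length : Int)
    · have hlt : c.toNat < (buildRows chars).length := by omega
      have hcast : ((c.toNat : Nat) : Int) = c := Int.toNat_of_nonneg hc0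
      have hget : PySem.List.pyGet? (buildRows chars) c = some ((buildRows chars)[c.toNat]) := by
        conv_lhs => rw [← hcast]
        rw [PySem.List.pyGet?_natCast]
        exact List.getElem?_eq_getElem hlt
      rw [getCombination_eq chars c hc0, if_pos ⟨hc0, hclt⟩, hget]
      simpa using (List.Perm.map String.mk ((buildRows_spec chars).2 c.toNat hlt)).symm
    · have : chars.length < c.toNat := by omega
      rw [getCombination_eq chars c hc0, PySem.List.combinations_eq_nil_of_length_lt chars this,
        if_neg (fun hh => by omega)]
  · rw [if_neg (fun hh => absurd hh.1 hc0)]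
    unfold getCombination
    rw [(dfsA_neg chars [] c (by omega)).1]

-- the two dict-building folds are counters of the flattened contribution lists
theorem dictA_eq (orders : List String) (cs : Int) :
    orders.foldl (fun d order =>
      (getCombination cs (PySem.List.sorted order.toList (fun c => c))).foldl
        (fun d combi => d.modify (String.mk combi) 0 (· + 1)) d) PySem.Dict.empty
    = PySem.Dict.counter (flatA orders cs) := by
  unfold flatA
  rw [PySem.Dict.counter_eq_foldl, List.flatMap_def, List.foldl_flatten, List.foldl_map]
  apply PySem.List.foldl_congr_mem
  intro acc order _
  exact (List.foldl_map (f := String.mk)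
    (g := fun (d : PySem.Dict String Int) (s : String) => d.modify s 0 (· + 1))).symm

theorem dictB_eq (orders : List String) (c : Int) :
    (orders.map (fun order => buildRows (PySem.List.sorted order.toList (fun ch => ch)))).foldl
      (fun cnt rows =>
        if 0 ≤ c ∧ c < (rows.length : Int) then
          ((PySem.List.pyGet? rows c).getD []).foldl (fun d t => d.modify (String.mk t) 0 (· + 1)) cnt
        else cnt) PySem.Dict.empty
    = PySem.Dict.counter (flatB orders c) := by
  unfold flatB
  rw [PySem.Dict.counter_eq_foldl, List.flatMap_def, List.foldl_flatten, List.foldl_map,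
    List.foldl_map]
  apply PySem.List.foldl_congr_mem
  intro acc order _
  by_cases h : 0 ≤ c ∧ c < ((buildRows (PySem.List.sorted order.toList (fun ch => ch))).length : Int)
  · rw [if_pos h, if_pos h]
    exact (List.foldl_map (f := String.mk)
      (g := fun (d : PySem.Dict String Int) (s : String) => d.modify s 0 (· + 1))).symm
  · rw [if_neg h, if_neg h]
    rfl

-- the per-course-size output chunks are permutations of each other
theorem chunk_perm (orders : List String) (cs : Int) :
    ((PySem.Dict.counter (flatA orders cs)).keys.filter (fun x =>
        decide (some ((PySem.Dict.counter (flatA orders cs)).getD x 0) =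
          (PySem.List.max? (PySem.Dict.counter (flatA orders cs)).values (fun v => v)).map (fun m => m)) &&
        decide ((PySem.Dict.counter (flatA orders cs)).getD x 0 > 1))).Perm
    ((((PySem.Dict.counter (flatB orders cs)).items.filter (fun p =>
        decide (p.2 = (if (PySem.Dict.counter (flatB orders cs)).items.isEmpty then 0 else
          (PySem.List.max? (PySem.Dict.counter (flatB orders cs)).values (fun v => v)).getD 0)) &&
        decide (p.2 > 1))).map (fun p => p.1))) := by
  have h := flatA_perm_flatB orders cs
  set a := flatA orders cs with ha
  set b := flatB orders cs with hb
  by_cases hbe : b = []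
  · have hae : a = [] := List.Perm.eq_nil (hbe ▸ h)
    rw [hae, hbe]
    simp [PySem.Dict.counter, PySem.Dict.empty]
  · -- keys are permutations of each other
    have hka : (PySem.Dict.counter a).keys = PySem.Set.ofList a := PySem.Dict.keys_counter a
    have hkb : (PySem.Dict.counter b).keys = PySem.Set.ofList b := PySem.Dict.keys_counter b
    have hkeys : (PySem.Set.ofList a).Perm (PySem.Set.ofList b) := by
      rw [List.perm_ext_iff_of_nodup (PySem.Set.nodup_ofList a) (PySem.Set.nodup_ofList b)]
      intro x
      rw [PySem.Set.mem_ofList, PySem.Set.mem_ofList]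
      exact h.mem_iff
    -- the count functions agree
    have hcount : ∀ s, a.count s = b.count s := fun s => h.count_eq s
    -- the values lists are permutations of each other
    have hva : (PySem.Dict.counter a).values = (PySem.Set.ofList a).map (fun k => ((a.count k : Nat) : Int)) := by
      rw [PySem.Dict.values_eq_map_keys _ (PySem.Dict.nodup_keys_counter a) 0, hka]
      exact List.map_congr_left (fun k _ => PySem.Dict.getD_counter a k)
    have hvb : (PySem.Dict.counter b).values = (PySem.Set.ofList b).map (fun k => ((b.count k : Nat) : Int)) := by
      rw [PySem.Dict.values_eq_map_keys _ (PySem.Dict.nodup_keys_counter b) 0, hkb]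
      exact List.map_congr_left (fun k _ => PySem.Dict.getD_counter b k)
    have hfe : (fun k => ((a.count k : Nat) : Int)) = (fun k => ((b.count k : Nat) : Int)) := by
      funext k; rw [hcount k]
    have hvperm : ((PySem.Dict.counter a).values).Perm ((PySem.Dict.counter b).values) := by
      rw [hva, hvb, hfe]
      exact hkeys.map _
    have hmax := max?_perm_int hvperm
    -- the max is some M
    obtain ⟨x0, hx0⟩ : ∃ x0, x0 ∈ b := List.exists_mem_of_ne_nil b hbe
    have hbne : PySem.Set.ofList b ≠ [] := by
      intro hnil
      exact absurd ((PySem.Set.mem_ofList b x0).2 hx0) (by rw [hnil]; simp)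
    obtain ⟨M, hM⟩ : ∃ M, PySem.List.max? (PySem.Dict.counter b).values (fun v => v) = some M := by
      cases hmm : PySem.List.max? (PySem.Dict.counter b).values (fun v => v) with
      | none =>
          rw [PySem.List.max?_eq_none_iff, hvb] at hmm
          exact absurd (List.map_eq_nil_iff.1 hmm) hbne
      | some M => exact ⟨M, rfl⟩
    have hitems : (PySem.Dict.counter b).items = (PySem.Set.ofList b).map (fun k => (k, ((b.count k : Nat) : Int))) :=
      PySem.Dict.items_counter b
    have hitemsne : ((PySem.Dict.counter b).items.isEmpty) = false := by
      rw [hitems, List.isEmpty_eq_false_iff, ← List.length_pos_iff, List.length_map,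
        List.length_pos_iff]
      exact hbne
    -- rewrite side B to a filter over the key set
    rw [if_neg (by rw [hitemsne]; simp), hM, Option.getD_some, hitems, List.filter_map,
      List.map_map, hka]
    -- rewrite side A's predicate
    rw [List.filter_congr (q := fun k =>
        decide (((b.count k : Nat) : Int) = M) && decide (((b.count k : Nat) : Int) > 1))
      (fun x hx => by
        rw [PySem.Dict.getD_counter a x, hmax, hM, hcount x]
        simp)]
    refine List.Perm.trans (hkeys.filter _) ?_
    simp [Function.comp_def]

-- ===== VERDICT (by name: the statement is the Claim_ definition above) =====
theorem solution_spec : Claim_equal_solution := by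
  intro orders course _
  unfold Spec_solution
  simp only [solution, solution_alt]
  rw [PySem.List.foldl_append_eq_flatMap, PySem.List.foldl_append_eq_flatMap]
  refine PySem.List.sorted_eq_sorted_of_perm _ _ _ (fun x y hxy => hxy) ?_
  simp only [List.nil_append]
  refine List.Perm.flatMap_left course ?_
  intro cs _
  have hc := chunk_perm orders cs
  rw [← dictA_eq orders cs, ← dictB_eq orders cs] at hc
  exact hc
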